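-- pv_equiv track=rewrite | github.com/corbincallahan/QRencryption | encryptor.py | intToString
-- ===== SOURCE A (Python) =====
-- def intToString(message):
--     out = ""
--     while(message > 0):
--         character = message % 37
--         message //= 37
--         if(character < 26):
--             out = chr(character + 97) + out
--         elif(character < 36):
--             out = chr(character + 22) + out
--         else:
--             out = ' ' + out
--
--     return out
-- ===== SOURCE B (Python) =====
-- DIGITS = "abcdefghijklmnopqrstuvwxyz0123456789 "
--
-- def intToString(message):
--     if message <= 0:
--         return ""
--     return intToString(message // 37) + DIGITS[message % 37]
-- ===== Notes on version B (the rewrite author's own statement) =====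
-- stated objective: simpler
-- what changed: Replaced the while-loop that prepends characters to an accumulator string with a direct recursion on message // 37 that appends, and replaced the three-way chr() branch with a single lookup string.
import Mathlib
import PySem

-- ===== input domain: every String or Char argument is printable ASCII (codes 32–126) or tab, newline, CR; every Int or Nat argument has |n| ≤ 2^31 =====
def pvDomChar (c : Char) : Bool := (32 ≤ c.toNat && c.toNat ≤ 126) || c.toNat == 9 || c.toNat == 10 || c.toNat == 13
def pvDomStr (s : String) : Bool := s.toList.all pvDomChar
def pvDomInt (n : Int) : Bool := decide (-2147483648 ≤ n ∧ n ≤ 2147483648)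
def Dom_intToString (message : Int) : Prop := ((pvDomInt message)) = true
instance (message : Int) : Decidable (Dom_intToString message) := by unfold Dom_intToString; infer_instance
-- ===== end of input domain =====

-- B replaces A's prepend-to-accumulator while-loop by a direct recursion that appends, with a digit lookup string (objective: simpler).
-- ===== PORT A =====
-- A's while-loop, made total with a Nat fuel (fuel = message.toNat suffices: message shrinks by //37 each step);
-- chr is Char.ofNat, exact for the 0..36 digit codes reached here.
def intToString_loop (fuel : Nat) (message : Int) (out : String) : String :=
  match fuel with
  | 0 => out
  | fuel + 1 =>
    if message > 0 then
      let character := PySem.Int.mod message 37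
      let message' := PySem.Int.floordiv message 37
      let out' :=
        if character < 26 then String.ofList [Char.ofNat (character + 97).toNat] ++ out
        else if character < 36 then String.ofList [Char.ofNat (character + 22).toNat] ++ out
        else " " ++ out
      intToString_loop fuel message' out'
    else out

def intToString (message : Int) : String := intToString_loop message.toNat message ""

-- ===== PORT B =====
def pvDigits : String := "abcdefghijklmnopqrstuvwxyz0123456789 "

-- B's recursion, with the same fuel device for totality
def intToString_alt_go (fuel : Nat) (message : Int) : String :=
  match fuel with
  | 0 => ""
  | fuel + 1 =>
    if message <= 0 then ""
    else intToString_alt_go fuel (PySem.Int.floordiv message 37) ++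
      ((PySem.Str.pyGet? pvDigits (PySem.Int.mod message 37)).map
        (fun c => String.ofList [c])).getD ""

def intToString_alt (message : Int) : String := intToString_alt_go message.toNat message

-- ===== PRECONDITION & SPEC =====
def Spec_intToString (message : Int) (out : String) : Prop := out = intToString_alt message
instance (message : Int) (out : String) : Decidable (Spec_intToString message out) := by unfold Spec_intToString; infer_instance

-- ===== CLAIM (what is proved, stated in full; the proofs are below) =====
def Claim_equal_intToString : Prop := ∀ (message : Int), Dom_intToString message → Spec_intToString message (intToString message)

-- ===== LEMMAS AND PROOFS =====
theorem pv_digit_eq (c : Int) (h0 : 0 ≤ c) (h1 : c < 37) :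
    (if c < 26 then String.ofList [Char.ofNat (c + 97).toNat]
     else if c < 36 then String.ofList [Char.ofNat (c + 22).toNat]
     else " ")
    = ((PySem.Str.pyGet? pvDigits c).map (fun c => String.ofList [c])).getD "" := by
  interval_cases c <;> decide

theorem pv_append_if3 (p q : Prop) [Decidable p] [Decidable q] (a b c out : String) :
    (if p then a ++ out else if q then b ++ out else c ++ out)
      = (if p then a else if q then b else c) ++ out := by
  split_ifs <;> rfl

-- the loop with accumulator `out` computes B's string, then `out` appended
theorem pv_loop_eq (fuel : Nat) (message : Int) (out : String) (hn : message.toNat ≤ fuel) :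
    intToString_loop fuel message out = intToString_alt_go fuel message ++ out := by
  induction fuel generalizing message out with
  | zero => simp [intToString_loop, intToString_alt_go]
  | succ fuel ih =>
    by_cases hm : message > 0
    · have hmm : ¬ message ≤ 0 := by omega
      have h37 : PySem.Int.floordiv message 37 = message / 37 :=
        PySem.Int.floordiv_eq_ediv_of_pos (by omega)
      have hmod : PySem.Int.mod message 37 = message % 37 :=
        PySem.Int.mod_eq_emod_of_pos (by omega)
      have hc0 : (0:Int) ≤ message % 37 := Int.emod_nonneg _ (by norm_num)
      have hc1 : message % 37 < 37 := Int.emod_lt_of_pos _ (by norm_num)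
      have hrec : (message / 37).toNat ≤ fuel := by omega
      simp only [intToString_loop, intToString_alt_go, if_pos hm, if_neg hmm, h37, hmod]
      rw [ih _ _ hrec, pv_append_if3,
        pv_digit_eq (message % 37) hc0 hc1, String.append_assoc]
    · simp [intToString_loop, intToString_alt_go, hm, show message ≤ 0 by omega]

-- ===== VERDICT (by name: the statement is the Claim_ definition above) =====
theorem intToString_spec : Claim_equal_intToString := by
  intro message _
  unfold Spec_intToString intToString intToString_alt
  rw [pv_loop_eq message.toNat message "" le_rfl]
  simp
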